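-- pv_equiv track=rewrite | github.com/Tatiana655/MethOpt | main.py | find_j_k
-- ===== SOURCE A (Python) =====
-- def find_j_k(N_k_0, d_k):
--     mini = 1
--     res = -1
--     for i in range(len(N_k_0)):
--         if d_k[i] < 0:
--             if mini != min(mini, d_k[i]):
--                 mini = min(mini, d_k[i])
--                 res = N_k_0[i]
--     return res
-- ===== SOURCE B (Python) =====
-- def find_j_k(N_k_0, d_k):
--     negs = [d_k[i] for i in range(len(N_k_0)) if d_k[i] < 0]
--     if not negs:
--         return -1
--     m = min(negs)
--     for i in range(len(N_k_0)):
--         if d_k[i] == m: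
--             return N_k_0[i]
-- ===== Notes on version B (the rewrite author's own statement) =====
-- stated objective: alternative
-- what changed: Replaces A's single running-minimum scan with a cost-equivalent two-pass decomposition: first collect the negative d_k values and take their minimum, then scan again for the first index attaining it and return the corresponding N_k_0 entry.
import Mathlib
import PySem

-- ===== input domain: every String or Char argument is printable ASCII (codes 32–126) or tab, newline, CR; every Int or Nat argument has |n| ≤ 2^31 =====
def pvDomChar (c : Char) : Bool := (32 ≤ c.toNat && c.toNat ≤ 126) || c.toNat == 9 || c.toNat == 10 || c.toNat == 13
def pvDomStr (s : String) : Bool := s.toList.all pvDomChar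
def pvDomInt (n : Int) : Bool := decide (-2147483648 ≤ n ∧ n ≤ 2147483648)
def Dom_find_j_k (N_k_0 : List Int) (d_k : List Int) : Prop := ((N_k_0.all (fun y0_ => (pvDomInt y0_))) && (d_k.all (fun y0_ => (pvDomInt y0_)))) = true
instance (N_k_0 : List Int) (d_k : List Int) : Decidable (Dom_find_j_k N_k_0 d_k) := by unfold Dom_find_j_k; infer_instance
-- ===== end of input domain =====

-- B replaces A's single running-minimum scan by a two-pass decomposition (collect negatives & min, then find first index of the min); same O(n) cost, return value only.

-- ===== PORT A =====
def find_j_k (N_k_0 : List Int) (d_k : List Int) : Int :=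
  let r := (PySem.List.pyRange 0 (N_k_0.length : Int) 1).foldl
    (fun (st : Int × Int) i =>
      let dv := PySem.List.pyGetD d_k i 0
      if dv < 0 then
        (if st.1 ≠ min st.1 dv then (min st.1 dv, PySem.List.pyGetD N_k_0 i 0) else st)
      else st)
    (1, -1)
  r.2

-- ===== PORT B =====
def find_j_k_alt (N_k_0 : List Int) (d_k : List Int) : Int :=
  let negs := (PySem.List.pyRange 0 (N_k_0.length : Int) 1).filterMap
    (fun i =>
      let v := PySem.List.pyGetD d_k i 0
      if v < 0 then some v else none)
  if negs.isEmpty then -1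
  else
    match PySem.List.min? negs (fun v => v) with
    | none => -1   -- unreachable: negs is nonempty in this branch
    | some m =>
      match (PySem.List.pyRange 0 (N_k_0.length : Int) 1).find?
              (fun i => PySem.List.pyGetD d_k i 0 == m) with
      | some i => PySem.List.pyGetD N_k_0 i 0
      | none => -1   -- unreachable: m occurs among the scanned d_k entries

-- ===== PRECONDITION & SPEC =====
-- Pre_ excludes exactly the inputs where A raises IndexError: len(N_k_0) > len(d_k).
def Pre_find_j_k (N_k_0 : List Int) (d_k : List Int) : Prop := N_k_0.length ≤ d_k.length
instance (N_k_0 : List Int) (d_k : List Int) : Decidable (Pre_find_j_k N_k_0 d_k) := by unfold Pre_find_j_k; infer_instance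
def pvWitness_find_j_k : List Int × List Int := ([5, 7], [-3, -1])

def Spec_find_j_k (N_k_0 : List Int) (d_k : List Int) (out : Int) : Prop := out = find_j_k_alt N_k_0 d_k
instance (N_k_0 : List Int) (d_k : List Int) (out : Int) : Decidable (Spec_find_j_k N_k_0 d_k out) := by unfold Spec_find_j_k; infer_instance

-- ===== CLAIM (what is proved, stated in full; the proofs are below) =====
def Claim_equal_find_j_k : Prop := ∀ (N_k_0 : List Int) (d_k : List Int), Dom_find_j_k N_k_0 d_k → Pre_find_j_k N_k_0 d_k → Spec_find_j_k N_k_0 d_k (find_j_k N_k_0 d_k)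

-- ===== LEMMAS AND PROOFS =====

-- A's loop body, at the level of the pair (N_k_0[i], d_k[i]).
def pvStepA (st : Int × Int) (p : Int × Int) : Int × Int :=
  if p.2 < 0 then
    (if st.1 ≠ min st.1 p.2 then (min st.1 p.2, p.1) else st)
  else st

-- The common characterisation of both programs over the list of pairs.
def pvSpecState (P : List (Int × Int)) : Int × Int :=
  match PySem.List.min? ((P.filter (fun p => decide (p.2 < 0))).map (·.2)) (fun v => v) with
  | none => (1, -1)
  | some m => (m, match P.find? (fun p => p.2 == m) with | some q => q.1 | none => -1)

lemma pv_range_succ (k : Nat) :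
    PySem.List.pyRange 0 ((k + 1 : Nat) : Int) 1
      = PySem.List.pyRange 0 (k : Int) 1 ++ [(k : Int)] := by
  have h : ((k + 1 : Nat) : Int) = (k : Int) + 1 := by push_cast; ring
  rw [h, PySem.List.pyRange_one_succ_right (by positivity)]

lemma pv_take_zip_succ (N d : List Int) (k : Nat) (hN : k < N.length) (hd : k < d.length) :
    (N.zip d).take (k + 1) = (N.zip d).take k ++ [(N[k], d[k])] := by
  have hk : k < (N.zip d).length := by simp [List.length_zip]; omega
  rw [List.take_succ, List.getElem?_eq_getElem hk]
  simp [List.getElem_zip]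

lemma pv_getD_nat (xs : List Int) (k : Nat) (h : k < xs.length) :
    xs[k]?.getD 0 = xs[k] := by
  simp [List.getElem?_eq_getElem h]

lemma pv_min?_none (xs : List Int) (h : PySem.List.min? xs (fun x => x) = none) : xs = [] := by
  cases xs with
  | nil => rfl
  | cons x t => rw [PySem.List.min?_id_cons] at h; cases h

lemma pv_bridge_fold (N d : List Int) (k : Nat) (hN : k ≤ N.length) (hd : k ≤ d.length)
    (init : Int × Int) :
    (PySem.List.pyRange 0 (k : Int) 1).foldl
      (fun st i => pvStepA st (PySem.List.pyGetD N i 0, PySem.List.pyGetD d i 0)) init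
      = ((N.zip d).take k).foldl pvStepA init := by
  induction k generalizing init with
  | zero => simp
  | succ k ih =>
    rw [pv_range_succ, pv_take_zip_succ N d k (by omega) (by omega),
        List.foldl_append, List.foldl_append, ih (by omega) (by omega)]
    simp [pv_getD_nat N k (by omega), pv_getD_nat d k (by omega)]

lemma pv_bridge_filterMap (N d : List Int) (k : Nat) (hN : k ≤ N.length) (hd : k ≤ d.length) :
    (PySem.List.pyRange 0 (k : Int) 1).filterMap
      (fun i => let v := PySem.List.pyGetD d i 0; if v < 0 then some v else none)
      = (((N.zip d).take k).filter (fun p => decide (p.2 < 0))).map (·.2) := by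
  induction k with
  | zero => simp
  | succ k ih =>
    rw [pv_range_succ, pv_take_zip_succ N d k (by omega) (by omega),
        List.filterMap_append, List.filter_append, List.map_append, ih (by omega) (by omega)]
    simp only [List.filterMap_cons, List.filterMap_nil, List.filter_cons, List.filter_nil,
      List.map_cons, List.map_nil, PySem.List.pyGetD_natCast,
      List.getD_eq_getElem d 0 (show k < d.length by omega)]
    generalize d[k] = dv
    by_cases h : dv < 0 <;> simp [h]

lemma pv_bridge_find (N d : List Int) (k : Nat) (hN : k ≤ N.length) (hd : k ≤ d.length) (m : Int) :
    ((PySem.List.pyRange 0 (k : Int) 1).find?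
        (fun i => PySem.List.pyGetD d i 0 == m)).map (fun i => PySem.List.pyGetD N i 0)
      = (((N.zip d).take k).find? (fun p => p.2 == m)).map (·.1) := by
  induction k with
  | zero => simp
  | succ k ih =>
    rw [pv_range_succ, pv_take_zip_succ N d k (by omega) (by omega),
        List.find?_append, List.find?_append]
    have hih := ih (by omega) (by omega)
    cases h1 : (PySem.List.pyRange 0 (k : Int) 1).find? (fun i => PySem.List.pyGetD d i 0 == m) with
    | some i =>
      rw [h1] at hih
      cases h2 : ((N.zip d).take k).find? (fun p => p.2 == m) with
      | none => rw [h2] at hih; simp at hih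
      | some q =>
        rw [h2] at hih; simp at hih
        simp [hih]
    | none =>
      rw [h1] at hih
      cases h2 : ((N.zip d).take k).find? (fun p => p.2 == m) with
      | some q => rw [h2] at hih; simp at hih
      | none =>
        by_cases h : d[k] = m <;>
          simp [pv_getD_nat d k (by omega), pv_getD_nat N k (by omega), h]

lemma pv_min?_append_singleton (xs : List Int) (v : Int) :
    PySem.List.min? (xs ++ [v]) (fun x => x)
      = some (match PySem.List.min? xs (fun x => x) with
              | none => v
              | some m => min m v) := by
  cases xs with
  | nil => rw [List.nil_append, PySem.List.min?_id_cons]; rfl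
  | cons x t => simp [PySem.List.min?_id_cons, List.foldl_append]

-- m returned by min? over the collected negatives is itself negative.
lemma pv_min_neg (P : List (Int × Int)) (m : Int)
    (h : PySem.List.min? ((P.filter (fun p => decide (p.2 < 0))).map (·.2)) (fun v => v) = some m) :
    m < 0 := by
  have hm := PySem.List.min?_mem h
  obtain ⟨p, hp, rfl⟩ := List.mem_map.mp hm
  have := List.mem_filter.mp hp
  simpa using this.2

lemma pv_core (P : List (Int × Int)) : P.foldl pvStepA (1, -1) = pvSpecState P := by
  induction P using List.reverseRecOn with
  | nil => simp [pvSpecState, PySem.List.min?]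
  | append_singleton P p ih =>
    rw [List.foldl_append, List.foldl_cons, List.foldl_nil, ih]
    unfold pvSpecState
    have hneg : (List.filter (fun r => decide (r.2 < 0)) (P ++ [p])).map (·.2)
        = (List.filter (fun r => decide (r.2 < 0)) P).map (·.2)
            ++ (if p.2 < 0 then [p.2] else []) := by
      by_cases h : p.2 < 0 <;> simp [List.filter_append, h]
    rw [hneg]
    by_cases hp : p.2 < 0
    · rw [if_pos hp, pv_min?_append_singleton]
      cases hmin : PySem.List.min? ((P.filter (fun r => decide (r.2 < 0))).map (·.2)) (fun v => v) with
      | none =>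
        have hfil : P.filter (fun r => decide (r.2 < 0)) = [] := by
          have := pv_min?_none _ hmin
          cases h : P.filter (fun r => decide (r.2 < 0)) with
          | nil => rfl
          | cons a t => rw [h] at this; simp at this
        have hnone : P.find? (fun q => q.2 == p.2) = none := by
          rw [List.find?_eq_none]
          intro q hq hq2
          have : q ∈ P.filter (fun r => decide (r.2 < 0)) := by
            rw [List.mem_filter]
            simp at hq2
            exact ⟨hq, by simp [hq2]; omega⟩
          rw [hfil] at this; simp at this
        have hm1 : min 1 p.2 = p.2 := by omega
        simp [pvStepA, hp, hm1, List.find?_append, hnone]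
        omega
      | some m =>
        have hmneg : m < 0 := pv_min_neg P m hmin
        have hmin' := PySem.List.min?_isMin hmin
        by_cases hlt : p.2 < m
        · have hnone : P.find? (fun q => q.2 == p.2) = none := by
            rw [List.find?_eq_none]
            intro q hq hq2
            simp at hq2
            have hmem : p.2 ∈ (P.filter (fun r => decide (r.2 < 0))).map (·.2) :=
              List.mem_map.mpr ⟨q, List.mem_filter.mpr ⟨hq, by simp; omega⟩, hq2⟩
            have := hmin' _ hmem
            simp at this; omega
          have hmm : min m p.2 = p.2 := by omega
          simp [pvStepA, hp, hmm, List.find?_append, hnone]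
          omega
        · have hfound : ∃ r, P.find? (fun q => q.2 == m) = some r := by
            have hmem := PySem.List.min?_mem hmin
            obtain ⟨q0, hq0, hq0m⟩ := List.mem_map.mp hmem
            have : (P.find? (fun q => q.2 == m)).isSome :=
              List.find?_isSome.mpr ⟨q0, (List.mem_filter.mp hq0).1, by simp [hq0m]⟩
            exact Option.isSome_iff_exists.mp this
          obtain ⟨r, hr⟩ := hfound
          have hmm : min m p.2 = m := by omega
          simp [pvStepA, hp, hmm, List.find?_append, hr]
    · rw [if_neg hp, List.append_nil]
      cases hmin : PySem.List.min? ((P.filter (fun r => decide (r.2 < 0))).map (·.2)) (fun v => v) with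
      | none => simp [pvStepA, hp]
      | some m =>
        have hfound : ∃ r, P.find? (fun q => q.2 == m) = some r := by
          have hmem := PySem.List.min?_mem hmin
          obtain ⟨q0, hq0, hq0m⟩ := List.mem_map.mp hmem
          have : (P.find? (fun q => q.2 == m)).isSome :=
            List.find?_isSome.mpr ⟨q0, (List.mem_filter.mp hq0).1, by simp [hq0m]⟩
          exact Option.isSome_iff_exists.mp this
        obtain ⟨r, hr⟩ := hfound
        simp [pvStepA, hp, List.find?_append, hr]

-- ===== VERDICT (by name: the statement is the Claim_ definition above) =====
theorem find_j_k_spec : Claim_equal_find_j_k := by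
  intro N d _ hpre
  unfold Spec_find_j_k find_j_k find_j_k_alt
  have hA :
      (PySem.List.pyRange 0 (N.length : Int) 1).foldl
        (fun (st : Int × Int) i =>
          let dv := PySem.List.pyGetD d i 0
          if dv < 0 then
            (if st.1 ≠ min st.1 dv then (min st.1 dv, PySem.List.pyGetD N i 0) else st)
          else st) (1, -1)
        = (N.zip d).foldl pvStepA (1, -1) := by
    have h := pv_bridge_fold N d N.length (le_refl _) hpre (1, -1)
    rw [List.take_of_length_le (by simp [List.length_zip])] at h
    rw [← h]
    rfl
  rw [hA, pv_core]
  have hfm := pv_bridge_filterMap N d N.length (le_refl _) hpre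
  rw [List.take_of_length_le (by simp [List.length_zip])] at hfm
  rw [hfm]
  unfold pvSpecState
  cases hmin : PySem.List.min? (((N.zip d).filter (fun p => decide (p.2 < 0))).map (·.2)) (fun v => v) with
  | none =>
    have := pv_min?_none _ hmin
    simp [this]
  | some m =>
    have hne : ¬ ((((N.zip d).filter (fun p => decide (p.2 < 0))).map (·.2)).isEmpty = true) := by
      intro h
      rw [List.isEmpty_iff.mp h] at hmin
      cases hmin
    have hfind := pv_bridge_find N d N.length (le_refl _) hpre m
    rw [List.take_of_length_le (by simp [List.length_zip])] at hfind
    simp only [hne, if_neg, hmin, List.isEmpty_iff]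
    cases hra : (PySem.List.pyRange 0 (N.length : Int) 1).find?
        (fun i => PySem.List.pyGetD d i 0 == m) with
    | none =>
      rw [hra] at hfind
      have h2 : (N.zip d).find? (fun p => p.2 == m) = none := by
        cases h : (N.zip d).find? (fun p => p.2 == m) with
        | none => rfl
        | some q => rw [h] at hfind; simp at hfind
      simp [hne, hmin, hra, h2]
    | some i =>
      rw [hra] at hfind
      cases h2 : (N.zip d).find? (fun p => p.2 == m) with
      | none => rw [h2] at hfind; simp at hfind
      | some q =>
        rw [h2] at hfind; simp at hfind
        simp [hne, hmin, hra, h2, hfind]
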